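-- pv_equiv track=rewrite | github.com/M-0-N-K/100-algorithms-challange-python | arrayConversion.py | arrayConversion
-- ===== SOURCE A (Python) =====
-- def arrayConversion(arr,iteration=0):
--     #since there is not given what will be done with odd sized array, I am skipping it.
--     if len(arr)==1:
--         return arr[0]
--     elif iteration==0:
--         res=[]
--         for i in range(0,len(arr)-1,2):
--             res.append(arr[i]+arr[i+1])
--         return arrayConversion(res,iteration=1)
--     else:
--         res=[]
--         for i in range(0,len(arr)-1,2):
--             res.append(arr[i]*arr[i+1])
--         return arrayConversion(res,iteration=0)
-- ===== SOURCE B (Python) =====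
-- def arrayConversion(arr, iteration=0):
--     add = (iteration == 0)
--     while len(arr) > 1:
--         res = []
--         for i in range(0, len(arr) - 1, 2):
--             res.append(arr[i] + arr[i + 1] if add else arr[i] * arr[i + 1])
--         arr = res
--         add = not add
--     return arr[0]
-- ===== Notes on version B (the rewrite author's own statement) =====
-- stated objective: simpler
-- what changed: Replaced the mutual self-recursion on an iteration flag with a single iterative while loop holding the current level and a boolean add flag that flips each level.
-- outside the precondition, e.g. on arrayConversion([], 0): A raises RecursionError, B raises IndexError
import Mathlib
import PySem

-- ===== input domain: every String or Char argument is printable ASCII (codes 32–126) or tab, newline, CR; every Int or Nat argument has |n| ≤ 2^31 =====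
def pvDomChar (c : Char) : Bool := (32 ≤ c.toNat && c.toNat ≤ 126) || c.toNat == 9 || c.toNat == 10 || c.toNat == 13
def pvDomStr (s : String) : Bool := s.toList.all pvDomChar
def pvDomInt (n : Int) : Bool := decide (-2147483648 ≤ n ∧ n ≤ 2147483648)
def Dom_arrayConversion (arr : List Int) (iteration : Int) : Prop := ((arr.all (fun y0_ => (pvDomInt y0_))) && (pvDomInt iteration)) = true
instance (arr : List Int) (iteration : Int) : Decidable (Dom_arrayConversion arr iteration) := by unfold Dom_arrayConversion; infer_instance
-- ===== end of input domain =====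

-- B replaces A's mutual self-recursion on an iteration flag by a single while loop
-- with a flipping boolean 'add' flag (objective: simpler). Equivalence is about the
-- RETURN value on non-empty input (on [] both Pythons fail: A by RecursionError, B by IndexError).

-- ===== PORT A =====
-- the 'for i in range(0, len(arr)-1, 2): res.append(arr[i]+arr[i+1])' pairing loop,
-- as the obvious structural recursion over consecutive pairs (a dangling last element is dropped,
-- exactly as range(0, len-1, 2) stops before it)
def sumPairs : List Int → List Int
  | a :: b :: rest => (a + b) :: sumPairs rest
  | _ => []

def mulPairs : List Int → List Int
  | a :: b :: rest => (a * b) :: mulPairs rest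
  | _ => []

-- termination facts for the ports (cited in decreasing_by)
theorem sumPairs_two_mul_le (l : List Int) : 2 * (sumPairs l).length ≤ l.length := by
  induction l using sumPairs.induct with
  | case1 a b rest ih => simp [sumPairs]; omega
  | case2 l h => cases l with
    | nil => simp [sumPairs]
    | cons a t => cases t with
      | nil => simp [sumPairs]
      | cons b r => exact absurd rfl (h a b r)

theorem mulPairs_two_mul_le (l : List Int) : 2 * (mulPairs l).length ≤ l.length := by
  induction l using mulPairs.induct with
  | case1 a b rest ih => simp [mulPairs]; omega
  | case2 l h => cases l with
    | nil => simp [mulPairs]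
    | cons a t => cases t with
      | nil => simp [mulPairs]
      | cons b r => exact absurd rfl (h a b r)

-- A: if len==1 return arr[0]; elif iteration==0 recurse on pairwise sums with 1; else on products with 0.
-- (On arr = [] the Python recurses forever (RecursionError); the 'then 0' branch is only a totality
-- guard for that input, which Pre_ excludes.)
def arrayConversion (arr : List Int) (iteration : Int) : Int :=
  if arr.length = 1 then arr.headD 0
  else if arr = [] then 0
  else if iteration == 0 then arrayConversion (sumPairs arr) 1
  else arrayConversion (mulPairs arr) 0
termination_by arr.length
decreasing_by
  · have := sumPairs_two_mul_le arr
    have : arr.length ≠ 0 := by simpa using (by assumption : ¬ arr = [])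
    omega
  · have := mulPairs_two_mul_le arr
    have : arr.length ≠ 0 := by simpa using (by assumption : ¬ arr = [])
    omega

-- ===== PORT B =====
-- the inner for-loop of Source B: one pairwise pass, sum or product according to the 'add' flag
def combinePairs (add : Bool) : List Int → List Int
  | a :: b :: rest => (if add then a + b else a * b) :: combinePairs add rest
  | _ => []

theorem combinePairs_two_mul_le (add : Bool) (l : List Int) :
    2 * (combinePairs add l).length ≤ l.length := by
  induction l using combinePairs.induct with
  | case1 a b rest ih => simp [combinePairs]; omega
  | case2 l h => cases l with
    | nil => simp [combinePairs]
    | cons a t => cases t with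
      | nil => simp [combinePairs]
      | cons b r => exact absurd rfl (h a b r)

-- the while loop of Source B: repeat the pairwise pass, flipping the flag, until len ≤ 1
def altLoop (arr : List Int) (add : Bool) : List Int :=
  if 1 < arr.length then altLoop (combinePairs add arr) (!add) else arr
termination_by arr.length
decreasing_by
  have := combinePairs_two_mul_le add arr
  omega

-- final 'return arr[0]' (on [] the Python raises IndexError; Pre_ excludes that input)
def arrayConversion_alt (arr : List Int) (iteration : Int) : Int :=
  (altLoop arr (iteration == 0)).headD 0

-- ===== PRECONDITION & SPEC =====
-- Pre_ excludes only arr = [], where A never returns (infinite recursion / RecursionError)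
def Pre_arrayConversion (arr : List Int) (iteration : Int) : Prop := arr ≠ []
instance (arr : List Int) (iteration : Int) : Decidable (Pre_arrayConversion arr iteration) := by unfold Pre_arrayConversion; infer_instance
def pvWitness_arrayConversion : List Int × Int := ([1, 2, 3, 4], 0)

def Spec_arrayConversion (arr : List Int) (iteration : Int) (out : Int) : Prop := out = arrayConversion_alt arr iteration
instance (arr : List Int) (iteration : Int) (out : Int) : Decidable (Spec_arrayConversion arr iteration out) := by unfold Spec_arrayConversion; infer_instance

-- ===== CLAIM (what is proved, stated in full; the proofs are below) =====
def Claim_equal_arrayConversion : Prop := ∀ (arr : List Int) (iteration : Int), Dom_arrayConversion arr iteration → Pre_arrayConversion arr iteration → Spec_arrayConversion arr iteration (arrayConversion arr iteration)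

-- ===== LEMMAS AND PROOFS =====

theorem sumPairs_eq_combinePairs (l : List Int) : sumPairs l = combinePairs true l := by
  induction l using sumPairs.induct with
  | case1 a b rest ih => simp [sumPairs, combinePairs, ih]
  | case2 l h => cases l with
    | nil => simp [sumPairs, combinePairs]
    | cons a t => cases t with
      | nil => simp [sumPairs, combinePairs]
      | cons b r => exact absurd rfl (h a b r)

theorem mulPairs_eq_combinePairs (l : List Int) : mulPairs l = combinePairs false l := by
  induction l using mulPairs.induct with
  | case1 a b rest ih => simp [mulPairs, combinePairs, ih]
  | case2 l h => cases l with
    | nil => simp [mulPairs, combinePairs]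
    | cons a t => cases t with
      | nil => simp [mulPairs, combinePairs]
      | cons b r => exact absurd rfl (h a b r)

theorem combinePairs_ne_nil (add : Bool) (l : List Int) (h : 2 ≤ l.length) :
    combinePairs add l ≠ [] := by
  cases l with
  | nil => simp at h
  | cons a t => cases t with
    | nil => simp at h
    | cons b r => simp [combinePairs]

theorem main_eq (n : Nat) : ∀ (arr : List Int) (it : Int), arr.length = n → arr ≠ [] →
    arrayConversion arr it = (altLoop arr (it == 0)).headD 0 := by
  induction n using Nat.strong_induction_on with
  | _ n ih =>
    intro arr it hlen hne
    by_cases h1 : arr.length = 1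
    · rw [arrayConversion, altLoop]
      simp [h1]
    · have h0 : arr.length ≠ 0 := by simpa using hne
      have h2 : 2 ≤ arr.length := by omega
      rw [arrayConversion, altLoop]
      simp only [h1, if_false, hne]
      have hlt : 1 < arr.length := by omega
      by_cases hi : it == 0
      · simp only [hi, if_true, if_pos hlt, sumPairs_eq_combinePairs]
        have hle := combinePairs_two_mul_le true arr
        have hnn := combinePairs_ne_nil true arr h2
        have := ih (combinePairs true arr).length (by omega) (combinePairs true arr) 1 rfl hnn
        simpa using this
      · simp only [hi, if_pos hlt, mulPairs_eq_combinePairs]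
        have hle := combinePairs_two_mul_le false arr
        have hnn := combinePairs_ne_nil false arr h2
        have := ih (combinePairs false arr).length (by omega) (combinePairs false arr) 0 rfl hnn
        simpa using this

-- ===== VERDICT (by name: the statement is the Claim_ definition above) =====
theorem arrayConversion_spec : Claim_equal_arrayConversion := by
  intro arr it _ hpre
  unfold Spec_arrayConversion arrayConversion_alt
  exact main_eq arr.length arr it rfl hpre
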